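-- pv_equiv track=rewrite | github.com/AndyShiloh/mini_project_CS_final_assignment | py006.3.6_副本.py | check_school
-- ===== SOURCE A (Python) =====
-- def check_school(stu,stu_school,mix_school = 2):
--     both_school = 0
--     if len(stu) <= 1:
--         return True
--     for i in stu:
--         for j in stu:
--             if j == i:
--                 continue
--             if stu_school[i] == stu_school[j]:
--                 both_school += 1
--             else :
--                 continue
--     if both_school > mix_school:
--         return False
--     return True
-- ===== SOURCE B (Python) =====
-- def check_school(stu, stu_school, mix_school=2):
--     # One pass: for each student, count earlier students in the same school
--     # but with a different id; each such pair is seen twice in A's double loop.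
--     if len(stu) <= 1:
--         return True
--     seen_school = {}
--     seen_id = {}
--     pairs = 0
--     for i in stu:
--         s = stu_school[i]
--         pairs += 2 * (seen_school.get(s, 0) - seen_id.get(i, 0))
--         seen_school[s] = seen_school.get(s, 0) + 1
--         seen_id[i] = seen_id.get(i, 0) + 1
--     return pairs <= mix_school
-- ===== Notes on version B (the rewrite author's own statement) =====
-- stated objective: alternative
-- what changed: Replaced A's double loop over all ordered student pairs by a single pass that keeps two counting dicts (students seen per school and per id) and adds 2*(same-school-so-far minus same-id-so-far) for each student.
-- outside the precondition, e.g. on check_school([0, 0], {4: 0, 2: 6853}, 2): A returns True, B raises KeyError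
import Mathlib
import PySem

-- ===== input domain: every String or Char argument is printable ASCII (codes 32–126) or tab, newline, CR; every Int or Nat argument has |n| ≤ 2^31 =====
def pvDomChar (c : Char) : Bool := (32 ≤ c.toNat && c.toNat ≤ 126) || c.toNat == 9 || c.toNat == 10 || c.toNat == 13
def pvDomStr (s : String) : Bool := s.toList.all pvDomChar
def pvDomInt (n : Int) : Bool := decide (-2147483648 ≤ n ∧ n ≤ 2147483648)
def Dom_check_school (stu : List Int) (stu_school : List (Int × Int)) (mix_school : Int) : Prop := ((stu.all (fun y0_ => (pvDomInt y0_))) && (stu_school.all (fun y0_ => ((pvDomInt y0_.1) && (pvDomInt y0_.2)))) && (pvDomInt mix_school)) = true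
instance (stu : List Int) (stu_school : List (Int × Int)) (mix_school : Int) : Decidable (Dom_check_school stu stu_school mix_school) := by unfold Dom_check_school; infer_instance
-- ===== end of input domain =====

-- B replaces A's double loop over ordered student pairs by one pass with two counting
-- dicts (same-school-so-far minus same-id-so-far, each pair counted twice); objective: alternative.

-- ===== PORT A =====
def check_school (stu : List Int) (stu_school : List (Int × Int)) (mix_school : Int) : Bool :=
  if stu.length ≤ 1 then true
  else
    let d := PySem.Dict.ofList stu_school
    let both_school : Int := stu.foldl (fun acc i =>
      stu.foldl (fun acc2 j =>
        if j = i then acc2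
        else if d.get? i = d.get? j then acc2 + 1    -- stu_school[i] == stu_school[j]; none = KeyError, excluded by Pre_
        else acc2) acc) 0
    if both_school > mix_school then false else true

-- ===== PORT B =====
def check_school_alt (stu : List Int) (stu_school : List (Int × Int)) (mix_school : Int) : Bool :=
  if stu.length ≤ 1 then true
  else
    let d := PySem.Dict.ofList stu_school
    let st := stu.foldl
      (fun (st : PySem.Dict (Option Int) Int × PySem.Dict Int Int × Int) i =>
        let s := d.get? i    -- s = stu_school[i]; none = KeyError, excluded by Pre_
        (st.1.insert s (st.1.getD s 0 + 1),
         st.2.1.insert i (st.2.1.getD i 0 + 1),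
         st.2.2 + 2 * (st.1.getD s 0 - st.2.1.getD i 0)))
      (PySem.Dict.empty, PySem.Dict.empty, 0)
    decide (st.2.2 ≤ mix_school)

-- ===== PRECONDITION & SPEC =====
-- Pre_ requires every student id of stu (when there are at least two entries) to be a key of
-- stu_school: outside that, Python A raises KeyError as soon as stu holds two distinct ids, and
-- when all ids of stu are equal A returns without ever looking a key up — an accident of the
-- loop's 'j == i: continue' that B cannot match, since B looks every id up and raises KeyError.
def Pre_check_school (stu : List Int) (stu_school : List (Int × Int)) (mix_school : Int) : Prop :=
  stu.length ≤ 1 ∨ ∀ i ∈ stu, (PySem.Dict.ofList stu_school).contains i = true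
instance (stu : List Int) (stu_school : List (Int × Int)) (mix_school : Int) : Decidable (Pre_check_school stu stu_school mix_school) := by unfold Pre_check_school; infer_instance

def pvWitness_check_school : List Int × (List (Int × Int)) × Int := ([0, 1, 2], [(0, 1), (1, 1), (2, 2)], 2)

def Spec_check_school (stu : List Int) (stu_school : List (Int × Int)) (mix_school : Int) (out : Bool) : Prop := out = check_school_alt stu stu_school mix_school
instance (stu : List Int) (stu_school : List (Int × Int)) (mix_school : Int) (out : Bool) : Decidable (Spec_check_school stu stu_school mix_school out) := by unfold Spec_check_school; infer_instance

-- ===== CLAIM (what is proved, stated in full; the proofs are below) =====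
def Claim_equal_check_school : Prop := ∀ (stu : List Int) (stu_school : List (Int × Int)) (mix_school : Int), Dom_check_school stu stu_school mix_school → Pre_check_school stu stu_school mix_school → Spec_check_school stu stu_school mix_school (check_school stu stu_school mix_school)
-- ===== LEMMAS AND PROOFS =====

-- weight of the ordered pair (i, j) in A's double loop; g = school lookup
def pvW (g : Int → Option Int) (i j : Int) : Int :=
  if j ≠ i ∧ g i = g j then 1 else 0

-- the double sum A accumulates
def pvN (g : Int → Option Int) (l : List Int) : Int :=
  (l.map (fun i => (l.map (pvW g i)).sum)).sum

lemma pvA_inner (g : Int → Option Int) (l : List Int) (i : Int) (acc : Int) :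
    l.foldl (fun acc2 j =>
      if j = i then acc2
      else if g i = g j then acc2 + 1
      else acc2) acc = acc + (l.map (pvW g i)).sum := by
  have hf : (fun acc2 j =>
      if j = i then acc2
      else if g i = g j then acc2 + 1
      else acc2) = (fun (acc2 : Int) (j : Int) => acc2 + pvW g i j) := by
    funext a j
    by_cases h1 : j = i
    · simp [pvW, h1]
    · by_cases h2 : g i = g j
      · simp [pvW, h1, h2]
      · simp [pvW, h1, h2]
  rw [hf, PySem.List.foldl_add]

lemma pvA_eq_N (g : Int → Option Int) (l : List Int) :
    l.foldl (fun acc i =>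
      l.foldl (fun acc2 j =>
        if j = i then acc2
        else if g i = g j then acc2 + 1
        else acc2) acc) 0 = pvN g l := by
  have hf : (fun acc i =>
      l.foldl (fun acc2 j =>
        if j = i then acc2
        else if g i = g j then acc2 + 1
        else acc2) acc) = (fun (acc : Int) (i : Int) => acc + (l.map (pvW g i)).sum) := by
    funext acc i
    exact pvA_inner g l i acc
  rw [hf, PySem.List.foldl_add]
  simp [pvN]

lemma pvSumW_right (g : Int → Option Int) (a : Int) (l : List Int) :
    (l.map (pvW g a)).sum
      = ((l.map g).count (g a) : Int) - (l.count a : Int) := by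
  induction l with
  | nil => simp
  | cons x xs ih =>
    simp only [List.map_cons, List.sum_cons, List.count_cons, ih]
    by_cases h1 : x = a
    · have hw : pvW g a x = 0 := by simp [pvW, h1]
      have hg : g x = g a := by rw [h1]
      rw [hw, if_pos (by exact beq_iff_eq.mpr hg), if_pos (by exact beq_iff_eq.mpr h1)]
      push_cast
      ring
    · by_cases h2 : g a = g x
      · have hw : pvW g a x = 1 := by simp [pvW, h1, h2]
        rw [hw, if_pos (by exact beq_iff_eq.mpr h2.symm), if_neg (by simp [h1])]
        push_cast
        ring
      · have hw : pvW g a x = 0 := by simp [pvW, h2]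
        rw [hw, if_neg (by simpa using fun h : g x = g a => h2 h.symm),
          if_neg (by simp [h1])]
        push_cast
        ring

lemma pvSumW_left (g : Int → Option Int) (a : Int) (l : List Int) :
    (l.map (fun i => pvW g i a)).sum
      = ((l.map g).count (g a) : Int) - (l.count a : Int) := by
  rw [← pvSumW_right g a l]
  apply congrArg
  apply List.map_congr_left
  intro i _
  unfold pvW
  by_cases h1 : i = a
  · simp [h1]
  · by_cases h2 : g a = g i
    · rw [if_pos ⟨by simpa using fun h : a = i => h1 h.symm, h2.symm⟩, if_pos ⟨by simpa using h1, h2⟩]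
    · rw [if_neg (by rintro ⟨-, h⟩; exact h2 h.symm), if_neg (by rintro ⟨-, h⟩; exact h2 h)]

lemma pvN_snoc (g : Int → Option Int) (l : List Int) (a : Int) :
    pvN g (l ++ [a]) = pvN g l
      + 2 * (((l.map g).count (g a) : Int) - (l.count a : Int)) := by
  unfold pvN
  have hWaa : pvW g a a = 0 := by simp [pvW]
  have h2 : ∀ i, ((l ++ [a]).map (pvW g i)).sum = (l.map (pvW g i)).sum + pvW g i a := by
    intro i
    rw [List.map_append, List.sum_append]
    simp
  have h1 : ((l ++ [a]).map (fun i => ((l ++ [a]).map (pvW g i)).sum)).sum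
      = (l.map (fun i => ((l ++ [a]).map (pvW g i)).sum)).sum + ((l ++ [a]).map (pvW g a)).sum := by
    rw [List.map_append, List.sum_append]
    simp
  have h3 : (l.map (fun i => ((l ++ [a]).map (pvW g i)).sum)).sum
      = (l.map (fun i => (l.map (pvW g i)).sum)).sum + (l.map (fun i => pvW g i a)).sum := by
    rw [show (l.map (fun i => ((l ++ [a]).map (pvW g i)).sum))
          = (l.map (fun i => (l.map (pvW g i)).sum + pvW g i a)) from
        List.map_congr_left (fun i _ => h2 i), PySem.List.sum_map_add_int]
  rw [h1, h3, h2 a, hWaa, pvSumW_left, pvSumW_right]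
  ring

lemma pvB_fold (g : Int → Option Int) (l : List Int) :
    l.foldl
      (fun (st : PySem.Dict (Option Int) Int × PySem.Dict Int Int × Int) i =>
        let s := g i
        (st.1.insert s (st.1.getD s 0 + 1),
         st.2.1.insert i (st.2.1.getD i 0 + 1),
         st.2.2 + 2 * (st.1.getD s 0 - st.2.1.getD i 0)))
      (PySem.Dict.empty, PySem.Dict.empty, 0)
    = (PySem.Dict.counter (l.map g), PySem.Dict.counter l, pvN g l) := by
  induction l using List.reverseRecOn with
  | nil => simp [pvN, ← PySem.Dict.foldl_insert_getD_add_one_eq_counter]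
  | append_singleton xs a ih =>
    rw [List.foldl_append, ih]
    simp only [List.foldl_cons, List.foldl_nil]
    refine Prod.ext ?_ (Prod.ext ?_ ?_)
    · show (PySem.Dict.counter (xs.map g)).insert (g a)
        ((PySem.Dict.counter (xs.map g)).getD (g a) 0 + 1)
        = PySem.Dict.counter ((xs ++ [a]).map g)
      rw [List.map_append, ← PySem.Dict.foldl_insert_getD_add_one_eq_counter,
        ← PySem.Dict.foldl_insert_getD_add_one_eq_counter, List.foldl_append]
      simp
    · show (PySem.Dict.counter xs).insert a ((PySem.Dict.counter xs).getD a 0 + 1)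
        = PySem.Dict.counter (xs ++ [a])
      rw [← PySem.Dict.foldl_insert_getD_add_one_eq_counter,
        ← PySem.Dict.foldl_insert_getD_add_one_eq_counter, List.foldl_append]
      simp
    · show pvN g xs
        + 2 * ((PySem.Dict.counter (xs.map g)).getD (g a) 0 - (PySem.Dict.counter xs).getD a 0)
        = pvN g (xs ++ [a])
      rw [pvN_snoc, PySem.Dict.getD_counter, PySem.Dict.getD_counter]

-- ===== VERDICT (by name: the statement is the Claim_ definition above) =====
theorem check_school_spec : Claim_equal_check_school := by
  intro stu ss mix _ _
  unfold Spec_check_school check_school check_school_alt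
  by_cases hlen : stu.length ≤ 1
  · simp [hlen]
  · simp only [hlen, if_false]
    rw [pvB_fold ((PySem.Dict.ofList ss).get?) stu, pvA_eq_N ((PySem.Dict.ofList ss).get?) stu]
    by_cases h : pvN ((PySem.Dict.ofList ss).get?) stu > mix
    · simp [h, show ¬ pvN ((PySem.Dict.ofList ss).get?) stu ≤ mix by omega]
    · simp [h, show pvN ((PySem.Dict.ofList ss).get?) stu ≤ mix by omega]
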